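-- pv_equiv track=rewrite | github.com/binoymichael/epi | hashtables/13-02-anonmymous-letter.py | search
-- ===== SOURCE A (Python) =====
-- from collections import Counter
--
-- def search(haystack, needle):
--     haystack_map = Counter(list(haystack))
--
--     needle_list = list(needle)
--     for char in needle_list:
--         if char in haystack_map and haystack_map[char] > 0:
--             haystack_map[char] -= 1
--         else:
--             return False
--     return True
-- ===== SOURCE B (Python) =====
-- from collections import Counter
--
-- def search(haystack, needle):
--     need = Counter(needle)
--     have = Counter(haystack)
--     for char, k in need.items():
--         if k > have.get(char, 0):
--             return False
--     return True
-- ===== Notes on version B (the rewrite author's own statement) =====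
-- stated objective: faster
-- what changed: A mutates a haystack counter, decrementing per needle character with an availability check at every step; B aggregates both strings into counters once and compares the needle's distinct-character counts against the haystack's counts in one table-vs-table pass.
import Mathlib
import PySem

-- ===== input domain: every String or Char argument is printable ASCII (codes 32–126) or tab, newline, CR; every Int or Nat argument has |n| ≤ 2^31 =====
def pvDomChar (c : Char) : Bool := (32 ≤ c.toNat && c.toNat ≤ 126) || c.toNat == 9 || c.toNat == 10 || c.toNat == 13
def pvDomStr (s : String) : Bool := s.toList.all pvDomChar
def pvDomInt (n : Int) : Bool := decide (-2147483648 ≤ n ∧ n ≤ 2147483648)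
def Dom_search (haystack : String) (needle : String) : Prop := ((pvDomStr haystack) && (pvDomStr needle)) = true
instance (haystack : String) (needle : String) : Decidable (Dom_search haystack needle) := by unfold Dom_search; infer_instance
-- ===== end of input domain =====

-- B replaces A's mutate-and-decrement single pass with aggregate-both-counters-then-compare (objective: measured constant-factor speedup).

-- ===== PORT A =====
-- for char in needle_list: if char in haystack_map and haystack_map[char] > 0: map[char] -= 1 else return False
def searchLoop (m : PySem.Dict Char Int) : List Char → Bool
  | [] => true
  | c :: cs =>
      if m.contains c && decide (m.getD c 0 > 0) then
        searchLoop (m.insert c (m.getD c 0 - 1)) cs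
      else false

def search (haystack : String) (needle : String) : Bool :=
  let haystackMap := PySem.Dict.counter haystack.toList
  searchLoop haystackMap needle.toList

-- ===== PORT B =====
-- for char, k in need.items(): if k > have.get(char, 0): return False
def checkItems (hav : PySem.Dict Char Int) : List (Char × Int) → Bool
  | [] => true
  | (c, k) :: rest => if k > hav.getD c 0 then false else checkItems hav rest

def search_alt (haystack : String) (needle : String) : Bool :=
  let need := PySem.Dict.counter needle.toList
  let hav := PySem.Dict.counter haystack.toList
  checkItems hav need.items

-- ===== PRECONDITION & SPEC =====
def Spec_search (haystack : String) (needle : String) (out : Bool) : Prop := out = search_alt haystack needle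
instance (haystack : String) (needle : String) (out : Bool) : Decidable (Spec_search haystack needle out) := by unfold Spec_search; infer_instance

-- ===== CLAIM (what is proved, stated in full; the proofs are below) =====
def Claim_equal_search : Prop := ∀ (haystack : String) (needle : String), Dom_search haystack needle → Spec_search haystack needle (search haystack needle)

-- ===== LEMMAS AND PROOFS =====

-- A's step condition reduces to the looked-up value being positive (absent keys look up as the default 0)
lemma searchLoop_cons (m : PySem.Dict Char Int) (c : Char) (cs : List Char) :
    searchLoop m (c :: cs) =
      if m.getD c 0 > 0 then searchLoop (m.insert c (m.getD c 0 - 1)) cs else false := by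
  show (if m.contains c && decide (m.getD c 0 > 0) then _ else false) = _
  by_cases h : m.contains c = true
  · simp [h]
  · have h0 : m.getD c 0 = 0 :=
      PySem.Dict.getD_of_not_contains m 0 (by simpa using h)
    simp [h, h0]

-- characterisation of A's loop: succeed iff each character's demand fits the (clamped) remaining supply
lemma searchLoop_iff (cs : List Char) (m : PySem.Dict Char Int) :
    searchLoop m cs = true ↔ ∀ x : Char, (cs.count x : Int) ≤ max 0 (m.getD x 0) := by
  induction cs generalizing m with
  | nil => simp [searchLoop]
  | cons c cs ih =>
    rw [searchLoop_cons]
    by_cases h : m.getD c 0 > 0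
    · simp only [h, if_pos]
      rw [ih]
      have key : ∀ x : Char,
          ((List.count x cs : Int) ≤ max 0 ((m.insert c (m.getD c 0 - 1)).getD x 0)) ↔
            ((List.count x (c :: cs) : Int) ≤ max 0 (m.getD x 0)) := by
        intro x
        rw [PySem.Dict.getD_insert]
        have hcnt : List.count x (c :: cs) = List.count x cs + (if c = x then 1 else 0) := by
          simp [List.count_cons]
        rw [hcnt]
        by_cases hx : x = c
        · subst hx
          rw [if_pos rfl, if_pos rfl]
          push_cast; omega
        · rw [if_neg hx, if_neg (fun hh : c = x => hx hh.symm)]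
          push_cast; omega
      exact ⟨fun H x => (key x).mp (H x), fun H x => (key x).mpr (H x)⟩
    · simp only [h, if_neg, not_false_eq_true]
      constructor
      · intro H; cases H
      · intro H
        exfalso
        have h1 := H c
        rw [List.count_cons_self] at h1
        push_cast at h1; omega

-- characterisation of B's comparison pass
lemma checkItems_iff (hav : PySem.Dict Char Int) (l : List (Char × Int)) :
    checkItems hav l = true ↔ ∀ p ∈ l, p.2 ≤ hav.getD p.1 0 := by
  induction l with
  | nil => simp [checkItems]
  | cons p rest ih =>
    obtain ⟨c, k⟩ := p
    by_cases h : k > hav.getD c 0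
    · simp only [checkItems, if_pos h]
      constructor
      · intro H; cases H
      · intro H
        exact absurd (H (c, k) List.mem_cons_self) (by simpa using h)
    · rw [show checkItems hav ((c, k) :: rest) = checkItems hav rest from by
        simp [checkItems, h]]
      rw [ih]
      constructor
      · intro H p hp
        rcases List.mem_cons.mp hp with rfl | hp'
        · simpa using (by omega : k ≤ hav.getD c 0)
        · exact H p hp'
      · intro H p hp
        exact H p (List.mem_cons_of_mem _ hp)

lemma search_alt_iff (haystack needle : String) :
    search_alt haystack needle = true ↔
      ∀ x : Char, (needle.toList.count x : Int) ≤ (haystack.toList.count x : Int) := by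
  show checkItems _ _ = true ↔ _
  rw [checkItems_iff]
  constructor
  · intro H x
    by_cases hx : x ∈ needle.toList
    · have hmem : (x, (needle.toList.count x : Int)) ∈ (PySem.Dict.counter needle.toList).items := by
        rw [PySem.Dict.items_counter]
        exact List.mem_map.mpr ⟨x, (PySem.Set.mem_ofList _ _).mpr hx, rfl⟩
      have := H _ hmem
      simpa [PySem.Dict.getD_counter] using this
    · rw [List.count_eq_zero_of_not_mem hx]
      positivity
  · intro H p hp
    rw [PySem.Dict.items_counter] at hp
    obtain ⟨x, _, rfl⟩ := List.mem_map.mp hp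
    simpa [PySem.Dict.getD_counter] using H x

lemma search_iff (haystack needle : String) :
    search haystack needle = true ↔
      ∀ x : Char, (needle.toList.count x : Int) ≤ (haystack.toList.count x : Int) := by
  show searchLoop _ _ = true ↔ _
  rw [searchLoop_iff]
  constructor
  · intro H x
    have := H x
    rw [PySem.Dict.getD_counter] at this
    omega
  · intro H x
    rw [PySem.Dict.getD_counter]
    have := H x
    omega

-- ===== VERDICT (by name: the statement is the Claim_ definition above) =====
theorem search_spec : Claim_equal_search := by
  intro haystack needle _
  show search haystack needle = search_alt haystack needle
  rw [Bool.eq_iff_iff, search_iff, search_alt_iff]
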